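-- pv_equiv track=rewrite | github.com/jpammerlaan/adventofcode24 | adventofcode24/09/09.py | remap_mem
-- ===== SOURCE A (Python) =====
-- def remap_mem(mem):
--     first_free, last_free = mem.index(None), len(mem) - 1
--     while last_free >= first_free:
--         m = mem[last_free]
--         if m is not None:
--             mem[first_free] = m
--             mem[last_free] = None
--         last_free -= 1
--         first_free = mem.index(None)
--     return mem
-- ===== SOURCE B (Python) =====
-- # Same return value as A on inputs containing None; O(n) single pass instead of
-- # A's repeated mem.index(None) rescans. Builds a fresh list (does not mutate mem;
-- # equivalence claimed about the return value only).
-- def remap_mem(mem):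
--     vals = [m for m in mem if m is not None]
--     back = vals[::-1]
--     k = len(vals)
--     out = []
--     t = 0
--     for m in mem[:k]:
--         if m is None:
--             out.append(back[t])
--             t += 1
--         else:
--             out.append(m)
--     return out + [None] * (len(mem) - k)
-- ===== Notes on version B (the rewrite author's own statement) =====
-- stated objective: faster
-- what changed: Instead of repeatedly rescanning with mem.index(None) while walking last_free down, B makes one pass: it collects the non-None values, reverses them, and builds the output left-to-right filling each leading hole from that reversed list, padding the tail with None.
import Mathlib
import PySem

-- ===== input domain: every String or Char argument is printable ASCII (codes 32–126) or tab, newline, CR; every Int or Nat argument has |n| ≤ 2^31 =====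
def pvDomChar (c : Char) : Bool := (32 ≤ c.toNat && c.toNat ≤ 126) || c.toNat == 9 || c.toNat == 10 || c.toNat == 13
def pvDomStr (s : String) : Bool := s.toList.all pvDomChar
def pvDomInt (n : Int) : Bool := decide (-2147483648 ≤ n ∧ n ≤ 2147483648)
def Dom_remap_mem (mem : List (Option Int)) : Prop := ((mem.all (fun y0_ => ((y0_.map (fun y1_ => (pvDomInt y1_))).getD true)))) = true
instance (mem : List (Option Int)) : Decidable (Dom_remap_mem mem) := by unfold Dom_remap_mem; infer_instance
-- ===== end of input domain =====

-- B replaces A's O(n^2) repeated `mem.index(None)` rescans by a single O(n) pass that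
-- fills the leading holes from a reversed list of the non-None values; equivalence is
-- about the RETURN value only (Python A compacts the list in place, B builds a new list).

-- ===== PORT A =====
-- the while loop: `lf` is last_free (the loop runs only while 0 ≤ last_free, since
-- first_free ≥ 0); when Python's `mem.index(None)` would raise ValueError inside the
-- loop (impossible when None ∈ mem) the port returns the current list.
def remapLoop (mem : List (Option Int)) (ff lf : Nat) : List (Option Int) :=
  if lf < ff then mem
  else
    let m := (PySem.List.pyGet? mem (lf : Int)).getD none
    let mem' := if m.isSome then (mem.set ff m).set lf none else mem
    match PySem.List.index? mem' none with
    | none => mem'      -- Python raises ValueError here; unreachable when None ∈ mem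
    | some ff' => if h : lf = 0 then mem' else remapLoop mem' ff' (lf - 1)
termination_by lf
decreasing_by omega

def remap_mem (mem : List (Option Int)) : List (Option Int) :=
  match PySem.List.index? mem none with
  | none => mem         -- Python raises ValueError; excluded by Pre_
  | some ff => remapLoop mem ff (mem.length - 1)

-- ===== PORT B =====
-- the body of Source B's `for m in mem[:k]` loop, on state (out, t)
def remapStep (back : List (Option Int)) (st : List (Option Int) × Nat) (m : Option Int) :
    List (Option Int) × Nat :=
  match m with
  | none => (st.1 ++ [back.getD st.2 none], st.2 + 1)  -- back[t]: t < back.length whenever reached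
  | some v => (st.1 ++ [some v], st.2)

def remap_mem_alt (mem : List (Option Int)) : List (Option Int) :=
  let vals := mem.filter (fun m => m.isSome)
  let back := vals.reverse                              -- vals[::-1]
  let k := vals.length
  ((PySem.List.slice mem none (some (k : Int))).foldl (remapStep back) ([], 0)).1
    ++ List.replicate (mem.length - k) none             -- out + [None] * (len(mem) - k)

-- ===== PRECONDITION & SPEC =====
-- Pre_ excludes exactly the inputs without None, on which A's first `mem.index(None)` raises ValueError.
def Pre_remap_mem (mem : List (Option Int)) : Prop := none ∈ mem
instance (mem : List (Option Int)) : Decidable (Pre_remap_mem mem) := by unfold Pre_remap_mem; infer_instance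

def pvWitness_remap_mem : List (Option Int) := [some 1, none, some 2]

def Spec_remap_mem (mem : List (Option Int)) (out : List (Option Int)) : Prop := out = remap_mem_alt mem
instance (mem : List (Option Int)) (out : List (Option Int)) : Decidable (Spec_remap_mem mem out) := by unfold Spec_remap_mem; infer_instance

-- ===== CLAIM (what is proved, stated in full; the proofs are below) =====
def Claim_equal_remap_mem : Prop := ∀ (mem : List (Option Int)), Dom_remap_mem mem → Pre_remap_mem mem → Spec_remap_mem mem (remap_mem mem)

-- ===== LEMMAS AND PROOFS =====

-- proof-only model of B's fill loop: replace each `none` of xs by the next element of bs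
def fillC : List (Option Int) → List (Option Int) → List (Option Int)
  | [], _ => []
  | some v :: r, bs => some v :: fillC r bs
  | none :: r, bs => bs.headD none :: fillC r bs.tail

theorem getD_eq_headD_drop (l : List (Option Int)) (t : Nat) :
    l.getD t none = (l.drop t).headD none := by
  induction t generalizing l with
  | zero => cases l <;> simp [List.getD]
  | succ n ih => cases l <;> simp [List.getD, ih]

theorem foldl_remapStep (back : List (Option Int)) (xs : List (Option Int)) :
    ∀ (out : List (Option Int)) (t : Nat),
    xs.foldl (remapStep back) (out, t) = (out ++ fillC xs (back.drop t), t + xs.count none) := by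
  induction xs with
  | nil => intro out t; simp [fillC]
  | cons x r ih =>
    intro out t
    cases x with
    | some v =>
      simp [remapStep, fillC, ih, List.count_cons]
    | none =>
      simp only [List.foldl_cons, remapStep, ih]
      rw [fillC, getD_eq_headD_drop, List.tail_drop]
      simp [List.count_cons]
      omega

theorem alt_eq (mem : List (Option Int)) :
    remap_mem_alt mem =
      fillC (mem.take (mem.filter (fun m => m.isSome)).length)
            ((mem.filter (fun m => m.isSome)).reverse)
        ++ List.replicate (mem.length - (mem.filter (fun m => m.isSome)).length) none := by
  rw [show remap_mem_alt mem = (List.foldl (remapStep (mem.filter (fun m : Option Int => m.isSome)).reverse) ([], 0) (PySem.List.slice mem none (some (((mem.filter (fun m : Option Int => m.isSome)).length : Nat) : Int)))).1 ++ List.replicate (mem.length - (mem.filter (fun m : Option Int => m.isSome)).length) none from rfl]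
  rw [PySem.List.slice_to_natCast, foldl_remapStep]
  simp

theorem fillC_all_some (xs bs : List (Option Int)) (h : ∀ x ∈ xs, x.isSome) :
    fillC xs bs = xs := by
  induction xs generalizing bs with
  | nil => simp [fillC]
  | cons x r ih =>
    cases x with
    | some v => simp only [fillC]; rw [ih bs (fun y hy => h y (by simp [hy]))]
    | none => exact absurd (h none (by simp)) (by simp)

theorem fillC_append_somes (P ys bs : List (Option Int)) (hP : ∀ x ∈ P, x.isSome) :
    fillC (P ++ ys) bs = P ++ fillC ys bs := by
  induction P with
  | nil => simp
  | cons x r ih =>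
    cases x with
    | some v =>
      simp only [List.cons_append, fillC]
      rw [ih (fun y hy => hP y (by simp [hy]))]
    | none => exact absurd (hP none (by simp)) (by simp)

theorem fillC_back_agree (xs : List (Option Int)) :
    ∀ (l e₁ e₂ : List (Option Int)), xs.count none ≤ l.length →
    fillC xs (l ++ e₁) = fillC xs (l ++ e₂) := by
  induction xs with
  | nil => intro l e₁ e₂ _; simp [fillC]
  | cons x r ih =>
    intro l e₁ e₂ hc
    cases x with
    | some v =>
      simp only [fillC]
      exact congrArg _ (ih l e₁ e₂ (by simp [List.count_cons] at hc ⊢; omega))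
    | none =>
      cases l with
      | nil => simp [List.count_cons] at hc
      | cons a l' =>
        simp only [List.cons_append, fillC, List.headD, List.tail]
        rw [ih l' e₁ e₂ (by simp [List.count_cons] at hc ⊢; omega)]

theorem filter_none_list (S : List (Option Int)) (hS : ∀ x ∈ S, x = none) :
    S.filter (fun m => m.isSome) = [] := by
  apply List.filter_eq_nil_iff.mpr
  intro a ha
  rw [hS a ha]; simp

-- compacted lists are fixed points of B
theorem alt_fixed (P : List (Option Int)) (s : Nat) (hP : ∀ x ∈ P, x.isSome) :
    remap_mem_alt (P ++ List.replicate s none) = P ++ List.replicate s none := by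
  rw [alt_eq]
  rw [List.filter_append, List.filter_eq_self.mpr hP,
      filter_none_list _ (fun x hx => (List.eq_of_mem_replicate hx)), List.append_nil]
  rw [List.take_append_of_le_length (le_refl _), List.take_length,
      fillC_all_some _ _ hP]
  simp

-- KEY: moving the last non-None value into the first hole does not change B's output
theorem alt_move (P M S : List (Option Int)) (v : Int)
    (hP : ∀ x ∈ P, x.isSome) (hS : ∀ x ∈ S, x = none) :
    remap_mem_alt (P ++ some v :: M ++ none :: S) = remap_mem_alt (P ++ none :: M ++ some v :: S) := by
  have hfS : S.filter (fun m => m.isSome) = [] := filter_none_list S hS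
  have hfP : P.filter (fun m => m.isSome) = P := List.filter_eq_self.mpr hP
  have hc : (M.filter (fun m => m.isSome)).length ≤ M.length := List.length_filter_le _ _
  rw [alt_eq, alt_eq]
  have hfilt1 : (P ++ some v :: M ++ none :: S).filter (fun m => m.isSome)
      = P ++ some v :: M.filter (fun m => m.isSome) := by
    simp [List.filter_append, hfP, hfS]
  have hfilt2 : (P ++ none :: M ++ some v :: S).filter (fun m => m.isSome)
      = P ++ (M.filter (fun m => m.isSome) ++ [some v]) := by
    simp [List.filter_append, hfP, hfS]
  rw [hfilt1, hfilt2]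
  have htake1 : (P ++ some v :: M ++ none :: S).take (P ++ some v :: M.filter (fun m => m.isSome)).length
      = P ++ some v :: M.take (M.filter (fun m => m.isSome)).length := by
    rw [List.take_append, List.take_append]
    simp only [List.length_append, List.length_cons, List.length_nil, Nat.zero_add]
    have h0 : P.length + ((M.filter (fun m => m.isSome)).length + 1) - (P.length + (M.length + 1)) = 0 := by omega
    rw [h0]
    simp [List.take_of_length_le]
  have htake2 : (P ++ none :: M ++ some v :: S).take (P ++ (M.filter (fun m => m.isSome) ++ [some v])).length
      = P ++ none :: M.take (M.filter (fun m => m.isSome)).length := by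
    rw [List.take_append, List.take_append]
    simp only [List.length_append, List.length_cons, List.length_nil, Nat.zero_add]
    have h0 : P.length + ((M.filter (fun m => m.isSome)).length + 1) - (P.length + (M.length + 1)) = 0 := by omega
    rw [h0]
    simp [List.take_of_length_le]
  rw [htake1, htake2]
  rw [fillC_append_somes _ _ _ hP, fillC_append_somes _ _ _ hP]
  have hcount : (M.take (M.filter (fun m => m.isSome)).length).count none
      ≤ (M.filter (fun m => m.isSome)).reverse.length :=
    le_trans List.count_le_length (by simp)
  have hfill : fillC (some v :: M.take (M.filter (fun m => m.isSome)).length)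
        ((P ++ some v :: M.filter (fun m => m.isSome)).reverse)
      = fillC (none :: M.take (M.filter (fun m => m.isSome)).length)
        ((P ++ (M.filter (fun m => m.isSome) ++ [some v])).reverse) := by
    rw [show (P ++ some v :: M.filter (fun m => m.isSome)).reverse
        = (M.filter (fun m => m.isSome)).reverse ++ (some v :: P.reverse) from by simp]
    rw [show (P ++ (M.filter (fun m => m.isSome) ++ [some v])).reverse
        = some v :: ((M.filter (fun m => m.isSome)).reverse ++ P.reverse) from by simp]
    rw [fillC, fillC]
    simp only [List.headD, List.tail_cons]
    rw [fillC_back_agree _ _ (some v :: P.reverse) P.reverse hcount]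
  rw [hfill]
  have hlen : (P ++ some v :: M ++ none :: S).length - (P ++ some v :: M.filter (fun m => m.isSome)).length
      = (P ++ none :: M ++ some v :: S).length - (P ++ (M.filter (fun m => m.isSome) ++ [some v])).length := by
    simp
  rw [hlen]

-- characterization of index?: first-occurrence decomposition
theorem index_decomp (mem : List (Option Int)) (ff : Nat)
    (h : PySem.List.index? mem none = some ff) :
    ∃ P suf, mem = P ++ none :: suf ∧ P.length = ff ∧ (∀ x ∈ P, x.isSome) := by
  obtain ⟨P, suf, hm, hl, hnm⟩ := (PySem.List.index?_eq_some_iff mem none ff).mp h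
  exact ⟨P, suf, hm, hl, fun x hx => by
    cases x with
    | some v => simp
    | none => exact absurd hx hnm⟩

-- main loop invariant: while the suffix after last_free is all None and first_free is
-- the index of the first None, the loop computes B's value
theorem loopA_eq (lf : Nat) : ∀ (mem : List (Option Int)) (ff : Nat),
    PySem.List.index? mem none = some ff →
    (∀ x ∈ mem.drop (lf + 1), x = none) →
    lf < mem.length →
    remapLoop mem ff lf = remap_mem_alt mem := by
  induction lf using Nat.strong_induction_on with
  | _ lf ih =>
  intro mem ff h1 h2 h3
  obtain ⟨P, suf, hmemeq, hlenP, hPsome⟩ := index_decomp mem ff h1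
  subst hmemeq
  have hlen : (P ++ none :: suf).length = P.length + suf.length + 1 := by
    simp only [List.length_append, List.length_cons]
    omega
  rw [remapLoop]
  by_cases hlt : lf < ff
  · -- loop exits: the list is already compacted
    rw [if_pos hlt]
    have hff : ff = lf + 1 := by
      by_contra hne
      have hlenP' : lf + 1 < P.length := by omega
      have hd : P.drop (lf + 1) ≠ [] := by
        intro he
        have := congrArg List.length he
        simp [List.length_drop] at this
        omega
      obtain ⟨y, hy⟩ := List.exists_mem_of_ne_nil _ hd
      have hyP : y ∈ P := List.mem_of_mem_drop hy
      have hymem : y ∈ (P ++ none :: suf).drop (lf + 1) := by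
        rw [List.drop_append_of_le_length (by omega)]
        exact List.mem_append_left _ hy
      have h4 := h2 y hymem
      have h5 := hPsome y hyP
      rw [h4] at h5
      exact absurd h5 (by simp)
    have hsuf : ∀ x ∈ suf, x = none := by
      intro x hx
      apply h2
      rw [show lf + 1 = P.length from by omega,
        List.drop_append_of_le_length (le_refl _)]
      simp [hx]
    rw [List.eq_replicate_of_mem hsuf,
      show (none :: List.replicate suf.length (none : Option Int))
        = List.replicate (suf.length + 1) none from rfl]
    exact (alt_fixed P (suf.length + 1) hPsome).symm
  · rw [if_neg hlt]
    have hffle : ff ≤ lf := by omega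
    simp only [PySem.List.pyGet?_natCast, List.getElem?_eq_getElem h3, Option.getD_some]
    have hfffst : (P ++ none :: suf)[ff]? = some none := by
      rw [List.getElem?_append_right (by omega)]
      simp [hlenP]
    cases hm : (P ++ none :: suf)[lf]'h3 with
    | none =>
      simp only [Option.isSome_none, Bool.false_eq_true, if_false]
      simp only [h1]
      by_cases h0 : lf = 0
      · subst h0
        rw [dif_pos rfl]
        have hP0 : P = [] := List.eq_nil_of_length_eq_zero (by omega)
        subst hP0
        have hsuf : ∀ x ∈ suf, x = none := by
          intro x hx
          exact h2 x (by simpa using hx)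
        rw [List.eq_replicate_of_mem hsuf,
          show ([] ++ none :: List.replicate suf.length (none : Option Int))
            = [] ++ List.replicate (suf.length + 1) none from rfl]
        exact (alt_fixed [] (suf.length + 1) (fun x hx => absurd hx (List.not_mem_nil))).symm
      · rw [dif_neg h0]
        apply ih (lf - 1) (by omega) _ ff h1 _ (by omega)
        intro x hx
        rw [show lf - 1 + 1 = lf from by omega] at hx
        rw [List.drop_eq_getElem_cons h3, hm] at hx
        rcases List.mem_cons.mp hx with rfl | hx'
        · rfl
        · exact h2 x hx'
    | some v =>
      simp only [Option.isSome_some, if_true]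
      have hmq : (P ++ none :: suf)[lf]? = some (some v) := by
        rw [List.getElem?_eq_getElem h3, hm]
      have hfflt : ff < lf := by
        rcases Nat.lt_or_ge ff lf with h | h
        · exact h
        · have he : ff = lf := by omega
          rw [he] at hfffst
          rw [hfffst] at hmq
          simp at hmq
      have hjlen : lf - ff - 1 < suf.length := by omega
      have hsufj : suf[lf - ff - 1]'hjlen = some v := by
        rw [List.getElem?_append_right (by omega)] at hmq
        rw [show lf - P.length = (lf - ff - 1) + 1 from by omega,
          List.getElem?_cons_succ, List.getElem?_eq_getElem hjlen] at hmq
        exact Option.some.inj hmq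
      obtain ⟨M, hMdef, hMlen⟩ : ∃ M, M = suf.take (lf - ff - 1) ∧ M.length = lf - ff - 1 :=
        ⟨_, rfl, by simp [List.length_take]; omega⟩
      obtain ⟨S, hSdef⟩ : ∃ S, S = suf.drop (lf - ff) := ⟨_, rfl⟩
      have hsufdec : suf = M ++ some v :: S := by
        rw [hMdef, hSdef]
        conv_lhs => rw [← List.take_append_drop (lf - ff - 1) suf]
        rw [List.drop_eq_getElem_cons hjlen, hsufj,
          show lf - ff - 1 + 1 = lf - ff from by omega]
      have hsuflen : suf.length = M.length + S.length + 1 := by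
        rw [hsufdec]; simp only [List.length_append, List.length_cons]; omega
      have hS : ∀ x ∈ S, x = none := by
        intro x hx
        apply h2
        rw [show lf + 1 = P.length + (lf - ff + 1) from by omega, List.drop_append]
        refine List.mem_append_right _ ?_
        rw [show P.length + (lf - ff + 1) - P.length = (lf - ff) + 1 from by omega,
          List.drop_succ_cons, ← hSdef]
        exact hx
      have hLlen : lf = (P ++ some v :: M).length := by
        simp only [List.length_append, List.length_cons]; omega
      have hset : ((P ++ none :: suf).set ff (some v)).set lf none
          = (P ++ some v :: M) ++ none :: S := by
        conv_lhs => rw [hsufdec]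
        rw [← hlenP]
        rw [show (P ++ none :: (M ++ some v :: S)).set P.length (some v)
            = P ++ some v :: (M ++ some v :: S) from by simp]
        rw [show P ++ some v :: (M ++ some v :: S)
            = (P ++ some v :: M) ++ some v :: S from by simp]
        rw [hLlen]
        simp
      rw [hset]
      have hnonein : (none : Option Int) ∈ (P ++ some v :: M) ++ none :: S :=
        List.mem_append_right _ (List.mem_cons_self)
      obtain ⟨ff', hff'⟩ := Option.isSome_iff_exists.mp ((PySem.List.index?_isSome_iff _ _).mpr hnonein)
      simp only [hff']
      have h0 : lf ≠ 0 := by omega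
      rw [dif_neg h0]
      rw [ih (lf - 1) (by omega) _ ff' hff' ?_ ?_]
      · rw [show ((P ++ some v :: M) ++ none :: S) = P ++ some v :: M ++ none :: S from by simp]
        rw [alt_move P M S v hPsome hS]
        congr 1
        conv_rhs => rw [hsufdec]
        simp
      · intro x hx
        rw [show lf - 1 + 1 = lf from by omega, hLlen,
          List.drop_append_of_le_length (le_refl _)] at hx
        simp at hx
        rcases hx with rfl | hx'
        · rfl
        · exact hS x hx'
      · simp only [List.length_append, List.length_cons]
        omega

-- ===== VERDICT (by name: the statement is the Claim_ definition above) =====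
theorem remap_mem_spec : Claim_equal_remap_mem := by
  intro mem _dom pre
  unfold Spec_remap_mem remap_mem
  have hmem : (PySem.List.index? mem none).isSome := (PySem.List.index?_isSome_iff mem none).mpr pre
  cases hidx : PySem.List.index? mem none with
  | none => rw [hidx] at hmem; exact absurd hmem (by decide)
  | some ff =>
    have hne : mem ≠ [] := by rintro rfl; exact List.not_mem_nil pre
    have hlen : 0 < mem.length := List.length_pos_of_ne_nil hne
    apply loopA_eq
    · exact hidx
    · intro x hx
      have h1 : mem.length - 1 + 1 = mem.length := by omega
      rw [h1, List.drop_length] at hx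
      exact absurd hx (List.not_mem_nil)
    · omega
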